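-- pv_equiv track=rewrite | github.com/spAm25/archive | 2020/system_analysis/lab5/report/source/lab5regression.py | get_polynom_list
-- ===== SOURCE A (Python) =====
-- from itertools import combinations
--
-- def get_polynom_list(polynom_parts, polynom_parts_count=3):
--     polynoms = []
--     combination_list = combinations(range(len(polynom_parts)), polynom_parts_count)
--     for combination in combination_list:
--         combination = sorted(combination, reverse=True)
--         result_element = []
--         for part_num in combination:
--             result_element.append(polynom_parts[part_num])
--         polynoms.append(result_element)
--     return polynoms
-- ===== SOURCE B (Python) =====
-- def get_polynom_list(polynom_parts, polynom_parts_count=3):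
--     # Recursive index-picking generator instead of itertools.combinations:
--     # picks ascending indices i; each finished element is built directly in
--     # descending-index order (tail already descending, picked part appended last),
--     # so no per-combination sort is needed.
--     n = len(polynom_parts)
--
--     def pick(start, remaining):
--         if remaining == 0:
--             return [[]]
--         res = []
--         for i in range(start, n - remaining + 1):
--             part = polynom_parts[i]
--             for tail in pick(i + 1, remaining - 1):
--                 res.append(tail + [part])
--         return res
--
--     return pick(0, polynom_parts_count)
-- ===== Notes on version B (the rewrite author's own statement) =====
-- stated objective: alternative
-- what changed: Replaces itertools.combinations plus a per-combination reverse sort and index lookup with a hand-written recursive index-picking generator that builds each result element directly in descending-index order (tail built first, picked part appended last), with the loop bound pruned to n-remaining+1.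
import Mathlib
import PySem

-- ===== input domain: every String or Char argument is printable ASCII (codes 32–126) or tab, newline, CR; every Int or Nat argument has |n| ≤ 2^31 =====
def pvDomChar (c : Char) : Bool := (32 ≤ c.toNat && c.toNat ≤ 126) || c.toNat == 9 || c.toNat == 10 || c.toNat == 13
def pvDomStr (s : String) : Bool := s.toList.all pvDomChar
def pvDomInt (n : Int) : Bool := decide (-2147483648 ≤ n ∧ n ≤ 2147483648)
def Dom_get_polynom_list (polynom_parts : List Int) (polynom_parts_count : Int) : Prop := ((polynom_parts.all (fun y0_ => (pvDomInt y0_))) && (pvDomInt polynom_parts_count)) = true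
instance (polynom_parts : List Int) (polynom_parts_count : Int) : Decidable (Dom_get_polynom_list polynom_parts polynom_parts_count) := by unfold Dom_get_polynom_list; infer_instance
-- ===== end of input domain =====

-- B replaces itertools.combinations + per-combination reverse sort + index lookup by a recursive
-- index-picking generator that emits each element directly in descending-index order (alternative).

-- ===== PORT A =====
-- itertools.combinations(iterable, r): not in PySem, ported by hand, step for step.
-- This recursion emits exactly the r-subsequences of the list in the same ascending
-- lexicographic order as itertools.combinations (combinations containing the head first).
def pvCombs : List Int → Nat → List (List Int)
  | _, 0 => [[]]
  | [], _ + 1 => []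
  | x :: xs, k + 1 => (pvCombs xs k).map (fun c => x :: c) ++ pvCombs xs (k + 1)

def get_polynom_list (polynom_parts : List Int) (polynom_parts_count : Int) : List (List Int) :=
  -- combinations(range(len(polynom_parts)), polynom_parts_count); count < 0 raises (outside Pre_)
  let combination_list := pvCombs (PySem.List.pyRange 0 polynom_parts.length 1) polynom_parts_count.toNat
  combination_list.foldl (fun polynoms combination =>
    let combination := PySem.List.sorted combination (fun x => x) true
    -- indices come from range(len(polynom_parts)), so pyGetD's default is never used
    let result_element := combination.foldl (fun re part_num => re ++ [PySem.List.pyGetD polynom_parts part_num 0]) []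
    polynoms ++ [result_element]) []

-- ===== PORT B =====
-- pick(start, remaining) of Source B; structural recursion on `remaining`
def pvPick (polynom_parts : List Int) (n : Nat) : Nat → Int → List (List Int)
  | 0, _ => [[]]
  | r + 1, start =>
    (PySem.List.pyRange start ((n : Int) - ((r : Int) + 1) + 1) 1).foldl (fun res i =>
      let part := PySem.List.pyGetD polynom_parts i 0
      (pvPick polynom_parts n r (i + 1)).foldl (fun res2 tail => res2 ++ [tail ++ [part]]) res) []

def get_polynom_list_alt (polynom_parts : List Int) (polynom_parts_count : Int) : List (List Int) :=
  pvPick polynom_parts polynom_parts.length polynom_parts_count.toNat 0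

-- ===== PRECONDITION & SPEC =====
-- Pre_ excludes a negative polynom_parts_count, on which Python's itertools.combinations raises ValueError.
def Pre_get_polynom_list (polynom_parts : List Int) (polynom_parts_count : Int) : Prop :=
  0 ≤ polynom_parts_count
instance (polynom_parts : List Int) (polynom_parts_count : Int) : Decidable (Pre_get_polynom_list polynom_parts polynom_parts_count) := by unfold Pre_get_polynom_list; infer_instance
def pvWitness_get_polynom_list : List Int × Int := ([3, 1, 4, 1], 2)

def Spec_get_polynom_list (polynom_parts : List Int) (polynom_parts_count : Int) (out : List (List Int)) : Prop := out = get_polynom_list_alt polynom_parts polynom_parts_count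
instance (polynom_parts : List Int) (polynom_parts_count : Int) (out : List (List Int)) : Decidable (Spec_get_polynom_list polynom_parts polynom_parts_count out) := by unfold Spec_get_polynom_list; infer_instance

-- ===== CLAIM (what is proved, stated in full; the proofs are below) =====
def Claim_equal_get_polynom_list : Prop := ∀ (polynom_parts : List Int) (polynom_parts_count : Int), Dom_get_polynom_list polynom_parts polynom_parts_count → Pre_get_polynom_list polynom_parts polynom_parts_count → Spec_get_polynom_list polynom_parts polynom_parts_count (get_polynom_list polynom_parts polynom_parts_count)

-- ===== LEMMAS AND PROOFS =====

-- pvCombs of a too-short list is empty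
theorem pvCombs_eq_nil_of_lt {l : List Int} {k : Nat} (h : l.length < k) : pvCombs l k = [] := by
  induction l generalizing k with
  | nil => cases k with
    | zero => omega
    | succ k => simp [pvCombs]
  | cons x xs ih =>
    cases k with
    | zero => omega
    | succ k =>
      simp only [pvCombs]
      rw [ih (by simpa using Nat.lt_of_succ_lt_succ h), ih (by simp at h ⊢; omega)]
      simp

-- every member of pvCombs l k is a sublist of l
theorem sublist_of_mem_pvCombs {l c : List Int} {k : Nat} (h : c ∈ pvCombs l k) : c.Sublist l := by
  induction l generalizing c k with
  | nil =>
    cases k with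
    | zero => simp [pvCombs] at h; simp [h]
    | succ k => simp [pvCombs] at h
  | cons x xs ih =>
    cases k with
    | zero => simp [pvCombs] at h; simp [h]
    | succ k =>
      simp only [pvCombs, List.mem_append, List.mem_map] at h
      rcases h with ⟨c', hc', rfl⟩ | h
      · exact (ih hc').cons₂ x
      · exact (ih h).cons x

-- flatMap characterisation of pvCombs over an integer range (with the pruned upper bound n - k)
theorem pvCombs_pyRange_flatMap (n : Int) (k : Nat) : ∀ (s : Int),
    pvCombs (PySem.List.pyRange s n 1) (k + 1)
      = (PySem.List.pyRange s (n - k) 1).flatMap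
          (fun i => (pvCombs (PySem.List.pyRange (i + 1) n 1) k).map (fun c => i :: c)) := by
  intro s
  by_cases hs : s < n
  · have hm : (n - s).toNat < (n - s).toNat + 1 := Nat.lt_succ_self _
    -- strong induction on the length of the range
    clear hm
    induction hlen : (n - s).toNat generalizing s with
    | zero =>
      rw [PySem.List.pyRange_one_eq_nil (by omega), PySem.List.pyRange_one_eq_nil (by omega)]
      simp [pvCombs_eq_nil_of_lt (l := ([] : List Int)) (k := k + 1) (by simp)]
    | succ m ih =>
      rw [PySem.List.pyRange_one_cons hs]
      simp only [pvCombs]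
      by_cases hsk : s < n - k
      · rw [PySem.List.pyRange_one_cons hsk, List.flatMap_cons]
        congr 1
        by_cases hs1 : s + 1 < n
        · exact ih (s + 1) hs1 (by omega)
        · rw [PySem.List.pyRange_one_eq_nil (by omega), PySem.List.pyRange_one_eq_nil (by omega)]
          have : k = 0 := by omega
          subst this
          simp [pvCombs]
      · -- pruned region: both sides are empty
        rw [PySem.List.pyRange_one_eq_nil (show n - (k : Int) ≤ s by omega)]
        have hlen1 : (PySem.List.pyRange (s + 1) n 1).length < k := by
          rw [PySem.List.length_pyRange_one]; omega
        rw [pvCombs_eq_nil_of_lt hlen1, pvCombs_eq_nil_of_lt (Nat.lt_succ_of_lt hlen1)]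
        simp
  · rw [PySem.List.pyRange_one_eq_nil (by omega), PySem.List.pyRange_one_eq_nil (by omega)]
    simp [pvCombs_eq_nil_of_lt (l := ([] : List Int)) (k := k + 1) (by simp)]

-- B's recursion computes pvCombs of the range, with each combination reversed and mapped through indexing
theorem pvPick_eq (pp : List Int) (k : Nat) : ∀ (s : Int),
    pvPick pp pp.length k s
      = (pvCombs (PySem.List.pyRange s pp.length 1) k).map
          (fun c => c.reverse.map (fun i => PySem.List.pyGetD pp i 0)) := by
  induction k with
  | zero => intro s; simp [pvPick, pvCombs]
  | succ r ih =>
    intro s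
    simp only [pvPick]
    have hbound : ((pp.length : Int) - ((r : Int) + 1) + 1) = (pp.length : Int) - r := by ring
    rw [hbound, pvCombs_pyRange_flatMap]
    rw [List.map_flatMap]
    have hfun : (fun (res : List (List Int)) (i : Int) =>
          (pvPick pp pp.length r (i + 1)).foldl
            (fun res2 tail => res2 ++ [tail ++ [PySem.List.pyGetD pp i 0]]) res)
        = (fun res i => res ++ ((pvCombs (PySem.List.pyRange (i + 1) pp.length 1) r).map
            (fun c => c.reverse.map (fun j => PySem.List.pyGetD pp j 0))).map
              (fun tail => tail ++ [PySem.List.pyGetD pp i 0])) := by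
      funext res i
      rw [ih (i + 1), PySem.List.foldl_append_singleton_eq_map]
    rw [hfun, PySem.List.foldl_append_eq_flatMap]
    simp only [List.nil_append]
    congr 1
    funext i
    simp [List.map_map, Function.comp]

-- ===== VERDICT (by name: the statement is the Claim_ definition above) =====
theorem get_polynom_list_spec : Claim_equal_get_polynom_list := by
  intro pp cnt _hDom _hPre
  unfold Spec_get_polynom_list get_polynom_list get_polynom_list_alt
  rw [pvPick_eq]
  rw [PySem.List.foldl_append_singleton_eq_map]
  simp only [List.nil_append]
  apply List.map_congr_left
  intro c hc
  have hsub : c.Sublist (PySem.List.pyRange 0 pp.length 1) := sublist_of_mem_pvCombs hc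
  have hpw : c.Pairwise (· < ·) := (PySem.List.pairwise_lt_pyRange_one 0 pp.length).sublist hsub
  have hsorted : PySem.List.sorted c (fun x => x) true = c.reverse := by
    apply PySem.List.sorted_rev_eq_of_perm_of_pairwise_gt
    · exact (List.reverse_perm c)
    · simpa [List.pairwise_reverse] using hpw
  rw [hsorted, PySem.List.foldl_append_singleton_eq_map]
  simp
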